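-- pv_equiv track=rewrite | github.com/brownnyi/Coding_TEST | 백준/Bronze/2480. 주사위 세개/주사위 세개.py | dice_check
-- ===== SOURCE A (Python) =====
-- def dice_check(f, s, t):
--     dice_list = [int(f), int(s), int(t)]
--     unique_dice = set(dice_list)
--
--     if len(unique_dice) == 1:  # 같은 눈이 3개인 경우
--         return 10000 + (dice_list[0] * 1000)
--     elif len(unique_dice) == 2:  # 같은 눈이 2개만 있는 경우
--         for i in unique_dice:
--             if dice_list.count(i) == 2:
--                 return 1000 + (i * 100)
--     else:  # 모두 다른 눈이 나오는 경우
--         return max(dice_list) * 100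
-- ===== SOURCE B (Python) =====
-- def dice_check(f, s, t):
--     x, y, z = sorted((int(f), int(s), int(t)))
--     r = (x == y) + (y == z)
--     return (z * 100, 1000 + y * 100, 10000 + y * 1000)[r]
-- ===== Notes on version B (the rewrite author's own statement) =====
-- stated objective: alternative
-- what changed: Sorts the three values so the middle element is always the repeated value, counts adjacent equalities arithmetically and selects the prize from a branch-free three-entry table, instead of A's set construction, len(set) dispatch and count-based loop over uniques.
import Mathlib
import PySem

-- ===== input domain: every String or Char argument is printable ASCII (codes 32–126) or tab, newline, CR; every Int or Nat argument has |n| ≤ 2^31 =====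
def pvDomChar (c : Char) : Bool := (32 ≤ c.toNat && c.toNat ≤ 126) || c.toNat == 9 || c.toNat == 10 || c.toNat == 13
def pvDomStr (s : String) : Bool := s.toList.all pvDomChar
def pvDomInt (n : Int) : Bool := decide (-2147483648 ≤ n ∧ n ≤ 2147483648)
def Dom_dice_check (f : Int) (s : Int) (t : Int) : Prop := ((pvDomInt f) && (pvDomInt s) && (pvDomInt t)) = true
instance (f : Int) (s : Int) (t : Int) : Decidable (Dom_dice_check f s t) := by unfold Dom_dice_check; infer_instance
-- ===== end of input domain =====

-- B sorts the three values, counts adjacent equalities and picks the prize from a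
-- three-entry table (the sorted middle element is always the repeated value), replacing
-- A's set construction, len(set) dispatch and count-based loop (objective: alternative).

-- ===== PORT A =====
def dice_check (f : Int) (s : Int) (t : Int) : Int :=
  let diceList : List Int := [f, s, t]
  let uniqueDice : PySem.Set Int := PySem.Set.ofList diceList
  if PySem.Set.len uniqueDice = 1 then
    10000 + (PySem.List.pyGetD diceList 0 0) * 1000
  else if PySem.Set.len uniqueDice = 2 then
    -- 'for i in unique_dice: if dice_list.count(i) == 2: return …'
    -- result is order-independent: exactly one unique element has count 2;
    -- the implicit 'return None' fall-through is unreachable (ported as 0)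
    match uniqueDice.find? (fun i => PySem.List.count diceList i == 2) with
    | some i => 1000 + i * 100
    | none => 0
  else
    ((PySem.List.max? diceList (fun x => x)).getD 0) * 100

-- ===== PORT B =====
def dice_check_alt (f : Int) (s : Int) (t : Int) : Int :=
  match PySem.List.sorted [f, s, t] (fun v => v) false with
  | [x, y, z] =>
    let r : Nat := (if x = y then 1 else 0) + (if y = z then 1 else 0)
    [z * 100, 1000 + y * 100, 10000 + y * 1000].getD r 0
  | _ => 0  -- unreachable: sorting a 3-element list yields 3 elements

-- ===== PRECONDITION & SPEC =====
def Spec_dice_check (f : Int) (s : Int) (t : Int) (out : Int) : Prop := out = dice_check_alt f s t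
instance (f : Int) (s : Int) (t : Int) (out : Int) : Decidable (Spec_dice_check f s t out) := by unfold Spec_dice_check; infer_instance

-- ===== CLAIM (what is proved, stated in full; the proofs are below) =====
def Claim_equal_dice_check : Prop := ∀ (f : Int) (s : Int) (t : Int), Dom_dice_check f s t → Spec_dice_check f s t (dice_check f s t)

-- ===== LEMMAS AND PROOFS =====
set_option maxHeartbeats 1000000


theorem sorted3 {x y z f s t : Int} (p : List.Perm [x, y, z] [f, s, t])
    (h1 : x ≤ y) (h2 : y ≤ z) :
    PySem.List.sorted [f, s, t] (fun v => v) false = [x, y, z] :=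
  PySem.List.sorted_id_eq_of_perm_of_pairwise [f, s, t] [x, y, z] p
    (by simp [List.pairwise_cons]; omega)

theorem perm213 (f s t : Int) : List.Perm [s, f, t] [f, s, t] := List.Perm.swap f s [t]
theorem perm132 (f s t : Int) : List.Perm [f, t, s] [f, s, t] := List.Perm.cons f (List.Perm.swap s t [])
theorem perm231 (f s t : Int) : List.Perm [s, t, f] [f, s, t] :=
  List.Perm.trans (List.Perm.cons s (List.Perm.swap f t [])) (perm213 f s t)
theorem perm312 (f s t : Int) : List.Perm [t, f, s] [f, s, t] :=
  List.Perm.trans (List.Perm.swap f t [s]) (perm132 f s t)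
theorem perm321 (f s t : Int) : List.Perm [t, s, f] [f, s, t] :=
  List.Perm.trans (List.Perm.swap s t [f]) (perm231 f s t)

theorem dice_check_cases (f s t : Int) : dice_check f s t = dice_check_alt f s t := by
  unfold dice_check dice_check_alt
  rcases le_total f s with hfs | hfs <;> rcases le_total s t with hst | hst <;>
    rcases le_total f t with hft | hft
  all_goals first
    | rw [sorted3 (List.Perm.refl _) hfs hst]
    | rw [sorted3 (perm132 f s t) hft hst]
    | rw [sorted3 (perm312 f s t) hft hfs]
    | rw [sorted3 (perm213 f s t) hfs hft]
    | rw [sorted3 (perm231 f s t) hst hft]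
    | rw [sorted3 (perm321 f s t) hst hfs]
  all_goals
    by_cases e1 : f = s <;> by_cases e2 : s = t <;> by_cases e3 : f = t <;>
      [skip; skip; skip; skip; skip; skip; skip; skip] <;>
      first
      | (simp_all [PySem.Set.ofList, PySem.Set.add, PySem.Set.len, PySem.Set.contains,
           PySem.List.count, PySem.List.pyGetD, PySem.List.pyGet?, PySem.List.pyIdx?,
           PySem.List.max?] <;>
         (repeat' first | omega | rfl | (split_ifs <;> simp_all <;> omega))
         done)
      | (have h1 : s ≠ f := fun h => e1 h.symm
         have h2 : t ≠ f := fun h => e3 h.symm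
         have h3 : t ≠ s := fun h => e2 h.symm
         rcases lt_or_gt_of_ne (a := f) (b := s) e1 with o1 | o1 <;>
         rcases lt_or_gt_of_ne (a := s) (b := t) e2 with o2 | o2 <;>
         rcases lt_or_gt_of_ne (a := f) (b := t) e3 with o3 | o3 <;>
         simp_all [PySem.Set.ofList, PySem.Set.add, PySem.Set.len, PySem.Set.contains,
           PySem.List.count, PySem.List.pyGetD, PySem.List.pyGet?, PySem.List.pyIdx?,
           PySem.List.max?, not_lt_of_gt] <;>
         omega)
-- ===== VERDICT (by name: the statement is the Claim_ definition above) =====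
theorem dice_check_spec : Claim_equal_dice_check := by
  intro f s t _
  exact dice_check_cases f s t
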